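-- pv_equiv track=rewrite | github.com/anan-ya-y/advent-of-code | src_2025/day8.py | in_same_component
-- ===== SOURCE A (Python) =====
-- def in_same_component(a, b, components):
--     a_comp = None
--     b_comp = None
--     for i in range(len(components)):
--         comp = components[i]
--         if a in comp:
--             a_comp = i
--         if b in comp:
--             b_comp = i
--
--     return a_comp == b_comp
-- ===== SOURCE B (Python) =====
-- def in_same_component(a, b, components):
--     index = {}
--     for i, comp in enumerate(components):
--         for x in comp:
--             index[x] = i
--     return index.get(a) == index.get(b)
-- ===== Notes on version B (the rewrite author's own statement) =====
-- stated objective: alternative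
-- what changed: B builds a single element-to-component-index dict (later components overwrite, matching A's last-wins) and answers with two O(1) lookups, instead of A's per-component membership scans into two tracked indices.
import Mathlib
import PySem

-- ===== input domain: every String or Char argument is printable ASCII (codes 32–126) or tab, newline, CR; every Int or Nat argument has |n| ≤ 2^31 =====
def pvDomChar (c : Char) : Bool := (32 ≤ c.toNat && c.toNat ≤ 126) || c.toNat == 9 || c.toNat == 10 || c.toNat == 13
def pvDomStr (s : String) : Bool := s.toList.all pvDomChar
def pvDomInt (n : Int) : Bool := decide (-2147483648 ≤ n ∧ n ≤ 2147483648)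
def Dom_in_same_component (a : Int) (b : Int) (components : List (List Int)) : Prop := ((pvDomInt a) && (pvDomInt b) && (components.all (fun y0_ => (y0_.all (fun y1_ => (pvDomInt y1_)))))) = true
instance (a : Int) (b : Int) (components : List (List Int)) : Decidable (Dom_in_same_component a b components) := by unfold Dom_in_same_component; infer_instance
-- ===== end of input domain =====

-- B replaces A's per-component membership scans tracking two indices by one element→index dict
-- built with last-wins overwrites plus two lookups (objective: alternative decomposition).


-- ===== PORT A =====
-- for i in range(len(components)): comp = components[i]; … — ported as a fold over the
-- enumerated list (index i paired with components[i]), updating a_comp/b_comp in order.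
def in_same_component (a : Int) (b : Int) (components : List (List Int)) : Bool :=
  let st := (PySem.List.enumerate components).foldl
    (fun (st : Option Int × Option Int) p =>
      ((if a ∈ p.2 then some p.1 else st.1), (if b ∈ p.2 then some p.1 else st.2)))
    (none, none)
  st.1 == st.2

-- ===== PORT B =====
def in_same_component_alt (a : Int) (b : Int) (components : List (List Int)) : Bool :=
  let d := (PySem.List.enumerate components).foldl
    (fun (d : PySem.Dict Int Int) p => p.2.foldl (fun d x => d.insert x p.1) d)
    PySem.Dict.empty
  d.get? a == d.get? b

-- ===== PRECONDITION & SPEC =====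
def Spec_in_same_component (a : Int) (b : Int) (components : List (List Int)) (out : Bool) : Prop := out = in_same_component_alt a b components
instance (a : Int) (b : Int) (components : List (List Int)) (out : Bool) : Decidable (Spec_in_same_component a b components out) := by unfold Spec_in_same_component; infer_instance

-- ===== CLAIM (what is proved, stated in full; the proofs are below) =====
def Claim_equal_in_same_component : Prop := ∀ (a : Int) (b : Int) (components : List (List Int)), Dom_in_same_component a b components → Spec_in_same_component a b components (in_same_component a b components)

-- ===== LEMMAS AND PROOFS =====

-- one component's insert loop: the dict afterwards answers k with i iff k is in the component
theorem dict_comp_loop (k i : Int) (comp : List Int) (d : PySem.Dict Int Int) :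
    (comp.foldl (fun d x => d.insert x i) d).get? k
      = if k ∈ comp then some i else d.get? k := by
  induction comp generalizing d with
  | nil => simp
  | cons x xs ih =>
    simp only [List.foldl_cons, ih, PySem.Dict.get?_insert, List.mem_cons]
    by_cases hx : k = x <;> by_cases hm : k ∈ xs <;> simp [hx, hm]

-- the whole dict build, observed at one key, equals A's single-key tracking fold
theorem dict_build (k : Int) (l : List (Int × List Int)) (d : PySem.Dict Int Int) :
    (l.foldl (fun (d : PySem.Dict Int Int) p => p.2.foldl (fun d x => d.insert x p.1) d) d).get? k
      = l.foldl (fun (o : Option Int) p => if k ∈ p.2 then some p.1 else o) (d.get? k) := by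
  induction l generalizing d with
  | nil => rfl
  | cons p ps ih => simp only [List.foldl_cons, ih, dict_comp_loop]

-- A's paired fold splits into the two single-key folds
theorem pair_fold (a b : Int) (l : List (Int × List Int)) (s t : Option Int) :
    l.foldl (fun (st : Option Int × Option Int) p =>
        ((if a ∈ p.2 then some p.1 else st.1), (if b ∈ p.2 then some p.1 else st.2))) (s, t)
      = (l.foldl (fun (o : Option Int) p => if a ∈ p.2 then some p.1 else o) s,
         l.foldl (fun (o : Option Int) p => if b ∈ p.2 then some p.1 else o) t) := by
  induction l generalizing s t with
  | nil => rfl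
  | cons p ps ih => simp only [List.foldl_cons, ih]

-- ===== VERDICT (by name: the statement is the Claim_ definition above) =====
theorem in_same_component_spec : Claim_equal_in_same_component := by
  intro a b components _
  unfold Spec_in_same_component in_same_component in_same_component_alt
  simp only [pair_fold, dict_build, PySem.Dict.get?_empty]
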